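-- pv_equiv track=rewrite | github.com/skabir8/CryptoSent | utils/queries.py | not_match
-- ===== SOURCE A (Python) =====
-- def not_match(q_list, sent):
--     counter = 0
--     word_hold = []
--     s_split = sent.split()
--     for word in q_list:
--         if word not in s_split:
--             counter += 1
--     if ( counter == len(q_list)):
--         word_hold.append(sent)
--         return word_hold
--     else:
--         return []
-- ===== SOURCE B (Python) =====
-- def not_match(q_list, sent):
--     qset = set(q_list)
--     for w in sent.split():
--         if w in qset:
--             return []
--     return [sent]
-- ===== Notes on version B (the rewrite author's own statement) =====
-- stated objective: alternative
-- what changed: Reverses the traversal: instead of counting query words absent from the sentence-word list and comparing the count to len(q_list), B builds a set of query words once and scans the sentence words, returning [] early at the first sentence word found in the query set, else [sent].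
import Mathlib
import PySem

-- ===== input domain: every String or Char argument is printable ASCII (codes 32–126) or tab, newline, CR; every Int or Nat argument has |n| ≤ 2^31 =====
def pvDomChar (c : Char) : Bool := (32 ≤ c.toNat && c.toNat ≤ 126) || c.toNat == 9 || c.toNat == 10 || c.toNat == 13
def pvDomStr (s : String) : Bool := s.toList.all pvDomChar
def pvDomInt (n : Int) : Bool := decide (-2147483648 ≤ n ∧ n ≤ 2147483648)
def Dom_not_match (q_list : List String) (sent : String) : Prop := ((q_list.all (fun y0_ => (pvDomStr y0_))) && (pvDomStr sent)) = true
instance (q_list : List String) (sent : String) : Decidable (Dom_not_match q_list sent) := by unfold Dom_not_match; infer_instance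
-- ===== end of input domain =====

-- B reverses the traversal: instead of A's count of query words absent from the sentence-word
-- list compared to len(q_list), B builds a set of the query words once and scans the SENTENCE
-- words, returning [] early at the first sentence word found in the query set (alternative).

-- ===== PORT A =====
def not_match (q_list : List String) (sent : String) : List String :=
  let s_split := PySem.Str.split₀ sent
  let counter := q_list.foldl (fun counter word =>
    if ¬ (s_split.contains word) then counter + 1 else counter) (0 : Int)
  if counter = (q_list.length : Int) then
    [sent]
  else
    []

-- ===== PORT B =====
-- the early-return 'for w in sent.split(): if w in qset: return []' loop
def nmAltLoop (qset : List String) (ws : List String) (sent : String) : List String :=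
  match ws with
  | [] => [sent]
  | w :: rest => if qset.contains w then [] else nmAltLoop qset rest sent

def not_match_alt (q_list : List String) (sent : String) : List String :=
  nmAltLoop (PySem.Set.ofList q_list) (PySem.Str.split₀ sent) sent

-- ===== PRECONDITION & SPEC =====
def Spec_not_match (q_list : List String) (sent : String) (out : List String) : Prop := out = not_match_alt q_list sent
instance (q_list : List String) (sent : String) (out : List String) : Decidable (Spec_not_match q_list sent out) := by unfold Spec_not_match; infer_instance

-- ===== CLAIM (what is proved, stated in full; the proofs are below) =====
def Claim_equal_not_match : Prop := ∀ (q_list : List String) (sent : String), Dom_not_match q_list sent → Spec_not_match q_list sent (not_match q_list sent)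

-- ===== LEMMAS AND PROOFS =====

theorem not_match_counter (s : List String) (q : List String) (c : Int) :
    q.foldl (fun counter word => if ¬ (s.contains word) then counter + 1 else counter) c
      = c + (q.countP (fun w => ¬ s.contains w)) := by
  induction q generalizing c with
  | nil => simp
  | cons w q ih =>
    simp only [List.foldl_cons, List.countP_cons, ih]
    by_cases h : w ∈ s <;> simp [h] <;> try omega

theorem countP_eq_length_iff {α : Type} (q : List α) (p : α → Bool) :
    ((q.countP p : Int) = (q.length : Int)) ↔ ∀ w ∈ q, p w = true := by
  rw [Int.ofNat_inj]
  exact List.countP_eq_length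

-- B's early-exit loop returns [sent] iff no scanned word lies in the query set
theorem nmAltLoop_eq (qset ws : List String) (sent : String) :
    nmAltLoop qset ws sent = if ∀ w ∈ ws, ¬ qset.contains w then [sent] else [] := by
  induction ws with
  | nil => simp [nmAltLoop]
  | cons w rest ih =>
    simp only [nmAltLoop, ih]
    by_cases h : w ∈ qset
    · simp [h]
    · simp only [List.contains_eq_mem, decide_false, Bool.false_eq_true, if_false,
        List.mem_cons, forall_eq_or_imp, h, not_false_iff, true_and]

-- ===== VERDICT (by name: the statement is the Claim_ definition above) =====
theorem not_match_spec : Claim_equal_not_match := by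
  intro q sent _
  unfold Spec_not_match not_match not_match_alt
  simp only [not_match_counter, zero_add, nmAltLoop_eq]
  by_cases hp : ∀ w ∈ PySem.Str.split₀ sent, w ∉ q
  · have ha : ((q.countP (fun w => ¬ (PySem.Str.split₀ sent).contains w) : Int) = (q.length : Int)) := by
      rw [countP_eq_length_iff]
      intro w hw
      simp only [List.contains_eq_mem, decide_eq_true_eq, decide_not, Bool.not_eq_true']
      exact decide_eq_false (fun hws => hp w hws hw)
    simp only [ha, if_true]
    rw [if_pos]
    intro w hw hmem
    exact hp w hw ((PySem.Set.mem_ofList _ _).mp (by simpa using hmem))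
  · push Not at hp
    obtain ⟨w, hws, hwq⟩ := hp
    have ha : ¬ ((q.countP (fun w => ¬ (PySem.Str.split₀ sent).contains w) : Int) = (q.length : Int)) := by
      rw [countP_eq_length_iff]
      intro hall
      have := hall w hwq
      simp [hws] at this
    simp only [ha, if_false]
    rw [if_neg]
    intro hno
    exact hno w hws (by simp [PySem.Set.mem_ofList, hwq])
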